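-- pv_equiv track=rewrite | github.com/Patryk-Rasiak/Advent-Of-Code-2021 | 3/3b.py | least_common_digit
-- ===== SOURCE A (Python) =====
-- def least_common_digit(data, index):
--     counts = {"0": 0, "1": 0}
--
--     for line in data:
--         counts[line[index]] += 1
--
--     if counts["0"] <= counts["1"]:
--         return "0"
--     else:
--         return "1"
-- ===== SOURCE B (Python) =====
-- def least_common_digit(data, index):
--     bits = sorted(line[index] for line in data)
--     if not bits:
--         return "0"
--     return "0" if bits[len(bits) // 2] == "1" else "1"
-- ===== Notes on version B (the rewrite author's own statement) =====
-- stated objective: alternative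
-- what changed: Replaces A's dict tally-and-compare with a sort-based median selection: the bits at the index are sorted and the answer is read off the middle element of the sorted list (ties land on '1' at the median, preserving tie-goes-to-'0').
import Mathlib
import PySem

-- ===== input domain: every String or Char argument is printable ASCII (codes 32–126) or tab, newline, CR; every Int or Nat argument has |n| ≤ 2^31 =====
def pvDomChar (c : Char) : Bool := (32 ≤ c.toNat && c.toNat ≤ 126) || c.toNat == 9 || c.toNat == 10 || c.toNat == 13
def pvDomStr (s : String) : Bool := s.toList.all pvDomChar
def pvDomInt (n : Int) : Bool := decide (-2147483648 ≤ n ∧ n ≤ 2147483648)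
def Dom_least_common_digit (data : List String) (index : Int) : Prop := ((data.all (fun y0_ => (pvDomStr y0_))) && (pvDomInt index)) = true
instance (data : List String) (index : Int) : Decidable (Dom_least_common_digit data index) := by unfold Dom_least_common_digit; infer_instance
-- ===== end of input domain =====

-- ===== PORT A =====
-- B answers by sorting the bits at the index and reading the middle element (return value only; objective: alternative algorithm).
-- counts[line[index]] += 1 : line[index] → pyGet? (none = IndexError, A raises there);
-- the += on an existing key is Dict.modify (under Pre_ the key "0"/"1" is always present, so the
-- default 0 is never used; on a missing key Python raises KeyError — excluded by Pre_).
def stepA (index : Int) (counts : PySem.Dict String Int) (line : String) : PySem.Dict String Int :=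
  match PySem.Str.pyGet? line index with
  | some c => counts.modify (String.ofList [c]) 0 (· + 1)
  | none => counts

def least_common_digit (data : List String) (index : Int) : String :=
  let counts : PySem.Dict String Int := PySem.Dict.ofList [("0", 0), ("1", 0)]
  let counts := data.foldl (stepA index) counts
  if counts.getD "0" 0 ≤ counts.getD "1" 0 then "0" else "1"

-- ===== PORT B =====
-- bits = sorted(line[index] for line in data): the generator raises IndexError on a short line
-- (excluded by Pre_); here the raising pyGet? = none case is made total with .getD ' '.
def least_common_digit_alt (data : List String) (index : Int) : String :=
  let bits := PySem.List.sorted (data.map (fun line => (PySem.Str.pyGet? line index).getD ' ')) (fun x => x) false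
  if bits = [] then "0"
  else if PySem.List.pyGet? bits (PySem.Int.floordiv (bits.length : Int) 2) = some '1' then "0" else "1"

-- ===== PRECONDITION & SPEC =====
-- Exactly the inputs where A returns: every line has a character at `index` and it is '0' or '1'
-- (otherwise A raises IndexError resp. KeyError).
def Pre_least_common_digit (data : List String) (index : Int) : Prop :=
  ∀ line ∈ data, PySem.Str.pyGet? line index = some '0' ∨ PySem.Str.pyGet? line index = some '1'
instance (data : List String) (index : Int) : Decidable (Pre_least_common_digit data index) := by unfold Pre_least_common_digit; infer_instance
def pvWitness_least_common_digit : List String × Int := (["01", "11", "00"], 1)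
def Spec_least_common_digit (data : List String) (index : Int) (out : String) : Prop := out = least_common_digit_alt data index
instance (data : List String) (index : Int) (out : String) : Decidable (Spec_least_common_digit data index out) := by unfold Spec_least_common_digit; infer_instance

-- ===== CLAIM (what is proved, stated in full; the proofs are below) =====
def Claim_equal_least_common_digit : Prop := ∀ (data : List String) (index : Int), Dom_least_common_digit data index → Pre_least_common_digit data index → Spec_least_common_digit data index (least_common_digit data index)

-- ===== LEMMAS AND PROOFS =====

-- A's fold keeps the dict literally of the shape {"0": z, "1": o}; its two values are the per-digit counts.
set_option maxHeartbeats 1000000 in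
theorem A_fold_inv (index : Int) (data : List String)
    (h : Pre_least_common_digit data index) (z o : Int) :
    data.foldl (stepA index) (PySem.Dict.mk [("0", z), ("1", o)])
      = PySem.Dict.mk
          [("0", z + (data.countP (fun l => PySem.Str.pyGet? l index = some '0') : Int)),
           ("1", o + (data.countP (fun l => PySem.Str.pyGet? l index = some '1') : Int))] := by
  induction data generalizing z o with
  | nil => simp
  | cons line rest ih =>
    have hrest : Pre_least_common_digit rest index := fun l hm => h l (by simp [hm])
    rw [List.foldl_cons, List.countP_cons, List.countP_cons]
    rcases h line (by simp) with hc | hc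
    · have hstep : stepA index (PySem.Dict.mk [("0", z), ("1", o)]) line
          = PySem.Dict.mk [("0", z + 1), ("1", o)] := by
        unfold stepA; rw [hc]; rfl
      rw [hstep, ih hrest]
      simp only [hc]
      simp
      all_goals omega
    · have hstep : stepA index (PySem.Dict.mk [("0", z), ("1", o)]) line
          = PySem.Dict.mk [("0", z), ("1", o + 1)] := by
        unfold stepA; rw [hc]; rfl
      rw [hstep, ih hrest]
      simp only [hc]
      simp
      all_goals omega

-- The bit list B extracts: counting members.
theorem bits_count (index : Int) (data : List String)
    (h : Pre_least_common_digit data index) (c : Char) (hc : c = '0' ∨ c = '1') :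
    (data.map (fun line => (PySem.Str.pyGet? line index).getD ' ')).count c
      = data.countP (fun line => PySem.Str.pyGet? line index = some c) := by
  induction data with
  | nil => simp
  | cons line rest ih =>
    have hrest : Pre_least_common_digit rest index := fun l hm => h l (by simp [hm])
    have hIH := ih hrest
    rcases h line (by simp) with hl | hl <;>
      simp only [List.map_cons, List.count_cons, List.countP_cons, hl, Option.getD_some, hIH] <;>
      rcases hc with rfl | rfl <;> simp

-- Every extracted bit is '0' or '1' under Pre_.
theorem bits_mem (index : Int) (data : List String)
    (h : Pre_least_common_digit data index) (c : Char)
    (hm : c ∈ data.map (fun line => (PySem.Str.pyGet? line index).getD ' ')) :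
    c = '0' ∨ c = '1' := by
  rcases List.mem_map.mp hm with ⟨line, hline, rfl⟩
  rcases h line hline with hl | hl <;> rw [hl] <;> simp

-- Sorting the bits gives exactly z zeros followed by o ones.
set_option maxHeartbeats 1000000 in
theorem sorted_bits (index : Int) (data : List String)
    (h : Pre_least_common_digit data index) :
    PySem.List.sorted (data.map (fun line => (PySem.Str.pyGet? line index).getD ' ')) (fun x => x) false
      = List.replicate (data.countP (fun line => PySem.Str.pyGet? line index = some '0')) '0'
        ++ List.replicate (data.countP (fun line => PySem.Str.pyGet? line index = some '1')) '1' := by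
  set cs := data.map (fun line => (PySem.Str.pyGet? line index).getD ' ') with hcs
  set z := data.countP (fun line => PySem.Str.pyGet? line index = some '0') with hz
  set o := data.countP (fun line => PySem.Str.pyGet? line index = some '1') with ho
  apply PySem.List.sorted_id_eq_of_perm_of_pairwise
  · -- permutation, via counts
    rw [List.perm_iff_count]
    intro a
    rw [List.count_append, List.count_replicate, List.count_replicate]
    by_cases h0 : a = '0'
    · subst h0
      rw [bits_count index data h '0' (Or.inl rfl)]
      simp [hz]
    · by_cases h1 : a = '1'
      · subst h1
        rw [bits_count index data h '1' (Or.inr rfl)]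
        simp [ho]
      · have : a ∉ cs := fun hm => by
          rcases bits_mem index data h a hm with rfl | rfl <;> simp_all
        rw [List.count_eq_zero.mpr this,
            if_neg (fun he => h0 (beq_iff_eq.mp he).symm), if_neg (fun he => h1 (beq_iff_eq.mp he).symm)]
  · -- pairwise ≤
    apply List.pairwise_append.mpr
    refine ⟨?_, ?_, ?_⟩
    · exact List.pairwise_replicate.mpr (Or.inr le_rfl)
    · exact List.pairwise_replicate.mpr (Or.inr le_rfl)
    · intro a ha b hb
      rw [List.eq_of_mem_replicate ha, List.eq_of_mem_replicate hb]
      decide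

-- The middle element of z zeros followed by o ones is '1' iff z ≤ o (for z + o > 0).
theorem median_bit (z o : Nat) (hpos : 0 < z + o) :
    (List.replicate z '0' ++ List.replicate o '1')[(z + o) / 2]'(by simp; omega)
      = (if z ≤ o then '1' else '0') := by
  by_cases hle : z ≤ o
  · have hge : z ≤ (z + o) / 2 := by omega
    rw [if_pos hle, List.getElem_append_right (by simpa using hge)]
    exact List.getElem_replicate _
  · have hlt : (z + o) / 2 < z := by omega
    rw [if_neg hle, List.getElem_append_left (by simpa using hlt)]
    exact List.getElem_replicate _

-- ===== VERDICT (by name: the statement is the Claim_ definition above) =====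
set_option maxHeartbeats 1000000 in
theorem least_common_digit_spec : Claim_equal_least_common_digit := by
  intro data index hdom hpre
  unfold Spec_least_common_digit least_common_digit least_common_digit_alt
  simp only
  have e : PySem.Dict.ofList [("0", (0 : Int)), ("1", 0)]
      = PySem.Dict.mk [("0", 0), ("1", 0)] := rfl
  rw [e, A_fold_inv index data hpre 0 0, sorted_bits index data hpre]
  set z := data.countP (fun line => PySem.Str.pyGet? line index = some '0') with hz
  set o := data.countP (fun line => PySem.Str.pyGet? line index = some '1') with ho
  have g0 : (PySem.Dict.mk [("0", (0 : Int) + (z : Int)), ("1", (0 : Int) + (o : Int))]).getD "0" 0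
      = 0 + (z : Int) := rfl
  have g1 : (PySem.Dict.mk [("0", (0 : Int) + (z : Int)), ("1", (0 : Int) + (o : Int))]).getD "1" 0
      = 0 + (o : Int) := rfl
  rw [g0, g1]
  by_cases hnil : z + o = 0
  · have hz0 : z = 0 := by omega
    have ho0 : o = 0 := by omega
    simp [hz0, ho0]
  · have hne : List.replicate z '0' ++ List.replicate o '1' ≠ [] := by
      simp; omega
    rw [if_neg hne]
    have hlen : (List.replicate z '0' ++ List.replicate o '1').length = z + o := by simp
    have hfd : PySem.Int.floordiv (((List.replicate z '0' ++ List.replicate o '1').length : Nat) : Int) 2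
        = (((z + o) / 2 : Nat) : Int) := by
      rw [hlen]; exact_mod_cast PySem.Int.floordiv_natCast (z + o) 2
    rw [hfd, PySem.List.pyGet?_natCast]
    have hidx : (z + o) / 2 < (List.replicate z '0' ++ List.replicate o '1').length := by
      rw [hlen]; omega
    rw [List.getElem?_eq_getElem hidx, median_bit z o (by omega)]
    by_cases hle : z ≤ o
    · rw [if_pos hle, if_pos (by omega : (0:Int) + z ≤ 0 + o), if_pos (by simp)]
    · rw [if_neg hle, if_neg (by omega : ¬ ((0:Int) + z ≤ 0 + o)), if_neg (by simp)]
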